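-- pv_equiv track=rewrite | github.com/sistemas-galdino/PMC-OS-FIRST | scripts/match_galdino.py | match_pessoa_exact
-- ===== SOURCE A (Python) =====
-- import json, re, unicodedata
--
-- def norm(s):
--     if not s: return ''
--     s = unicodedata.normalize('NFKD', s)
--     s = ''.join(c for c in s if not unicodedata.combining(c))
--     return s.lower().strip()
--
-- def match_pessoa_exact(pessoa_n, clientes):
--     if not pessoa_n: return None
--     tokens = pessoa_n.split()
--     if len(tokens) < 2:
--         if len(pessoa_n) < 4: return None
--         for c in clientes:
--             nc = norm(c['nome_cliente'])
--             if pessoa_n == nc or (len(pessoa_n) > 4 and pessoa_n in nc): return c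
--         return None
--     first, last = tokens[0], tokens[-1]
--     for c in clientes:
--         nc = norm(c['nome_cliente'])
--         t = nc.split()
--         if not t: continue
--         if first == t[0] and last == t[-1]: return c
--     for c in clientes:
--         nc = norm(c['nome_cliente'])
--         t = nc.split()
--         if first in t and last in t: return c
--     return None
-- ===== SOURCE B (Python) =====
-- import unicodedata
--
-- def norm(s):
--     if not s: return ''
--     s = unicodedata.normalize('NFKD', s)
--     s = ''.join(c for c in s if not unicodedata.combining(c))
--     return s.lower().strip()
--
-- def match_pessoa_exact(pessoa_n, clientes):
--     if not pessoa_n: return None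
--     tokens = pessoa_n.split()
--     if len(tokens) < 2:
--         if len(pessoa_n) < 4: return None
--         return next((c for c in clientes
--                      if pessoa_n == norm(c['nome_cliente'])
--                      or (len(pessoa_n) > 4 and pessoa_n in norm(c['nome_cliente']))), None)
--     first, last = tokens[0], tokens[-1]
--     fallback = None
--     for c in clientes:
--         t = norm(c['nome_cliente']).split()
--         if not t: continue
--         if first == t[0] and last == t[-1]:
--             return c            # tier-1 match always wins, even over an earlier fallback
--         if fallback is None and first in t and last in t:
--             fallback = c        # remember first tier-2 candidate, keep scanning for tier-1
--     return fallback
-- ===== Notes on version B (the rewrite author's own statement) =====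
-- stated objective: alternative
-- what changed: The two sequential scans of clientes (tier-1 exact first/last, then tier-2 token membership) are fused into one single pass that returns immediately on a tier-1 match and remembers the first tier-2 candidate as a fallback returned only after the full scan; the single-token branch becomes a next()-over-generator (find-first).
import Mathlib
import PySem

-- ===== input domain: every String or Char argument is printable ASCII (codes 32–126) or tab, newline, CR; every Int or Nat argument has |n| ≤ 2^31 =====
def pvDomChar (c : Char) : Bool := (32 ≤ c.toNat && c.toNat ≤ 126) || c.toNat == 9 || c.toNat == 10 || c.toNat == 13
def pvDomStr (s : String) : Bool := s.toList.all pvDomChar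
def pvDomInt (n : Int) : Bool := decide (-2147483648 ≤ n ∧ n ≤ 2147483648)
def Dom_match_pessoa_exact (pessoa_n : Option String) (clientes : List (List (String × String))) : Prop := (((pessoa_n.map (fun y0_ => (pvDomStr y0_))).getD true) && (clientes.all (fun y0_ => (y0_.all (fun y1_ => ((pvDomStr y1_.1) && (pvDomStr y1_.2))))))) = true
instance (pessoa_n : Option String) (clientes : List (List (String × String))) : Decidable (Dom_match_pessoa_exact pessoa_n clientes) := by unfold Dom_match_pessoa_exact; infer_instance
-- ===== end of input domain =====

-- B fuses A's two sequential scans (tier-1 exact first/last, then tier-2 token membership) into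
-- one pass with a remembered fallback; objective: alternative (same cost, one traversal).

-- ===== PORT A =====
-- c['nome_cliente'] (KeyError excluded by Pre_: under Pre_ the key exists, .getD "" is never taken)
def nomeOf (c : List (String × String)) : String :=
  ((c.find? (fun kv => kv.1 == "nome_cliente")).map Prod.snd).getD ""

-- norm: on the ASCII input domain NFKD normalization is the identity and there are no combining
-- characters, so norm(s) is exactly s.lower().strip() (with the 'if not s' guard kept).
def normPy (s : String) : String :=
  if s == "" then "" else PySem.Str.strip (PySem.Str.lower s)

-- A's single-token loop
def aLoopSingle (p : String) (cs : List (List (String × String))) : Option (List (String × String)) :=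
  match cs with
  | [] => none
  | c :: rest =>
    let nc := normPy (nomeOf c)
    if p == nc || (decide (4 < PySem.Str.len p) && PySem.Str.isIn p nc) then some c
    else aLoopSingle p rest

-- A's first two-token loop (exact first/last position)
def aLoop1 (first last : String) (cs : List (List (String × String))) : Option (List (String × String)) :=
  match cs with
  | [] => none
  | c :: rest =>
    match PySem.Str.split₀ (normPy (nomeOf c)) with
    | [] => aLoop1 first last rest
    | x :: xs =>
      if first == x && last == xs.getLastD x then some c else aLoop1 first last rest

-- A's second two-token loop (token membership)
def aLoop2 (first last : String) (cs : List (List (String × String))) : Option (List (String × String)) :=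
  match cs with
  | [] => none
  | c :: rest =>
    let t := PySem.Str.split₀ (normPy (nomeOf c))
    if t.contains first && t.contains last then some c else aLoop2 first last rest

def match_pessoa_exact (pessoa_n : Option String) (clientes : List (List (String × String))) : Option (List (String × String)) :=
  match pessoa_n with
  | none => none
  | some p =>
    if p == "" then none
    else
      match PySem.Str.split₀ p with
      | [] =>
        if PySem.Str.len p < 4 then none else aLoopSingle p clientes
      | [_] =>
        if PySem.Str.len p < 4 then none else aLoopSingle p clientes
      | t0 :: t1 :: ts =>
        let first := t0
        let last := (t1 :: ts).getLastD t0
        match aLoop1 first last clientes with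
        | some c => some c
        | none => aLoop2 first last clientes

-- ===== PORT B =====
-- B's fused two-token pass: return on tier-1, remember first tier-2 candidate in fb
def bLoop (first last : String) (cs : List (List (String × String))) (fb : Option (List (String × String))) : Option (List (String × String)) :=
  match cs with
  | [] => fb
  | c :: rest =>
    match PySem.Str.split₀ (normPy (nomeOf c)) with
    | [] => bLoop first last rest fb
    | x :: xs =>
      if first == x && last == xs.getLastD x then some c
      else if fb.isNone && (x :: xs).contains first && (x :: xs).contains last then
        bLoop first last rest (some c)
      else bLoop first last rest fb

def match_pessoa_exact_alt (pessoa_n : Option String) (clientes : List (List (String × String))) : Option (List (String × String)) :=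
  match pessoa_n with
  | none => none
  | some p =>
    if p == "" then none
    else
      match PySem.Str.split₀ p with
      | [] =>
        if PySem.Str.len p < 4 then none
        else clientes.find? (fun c =>
          p == normPy (nomeOf c) ||
          (decide (4 < PySem.Str.len p) && PySem.Str.isIn p (normPy (nomeOf c))))
      | [_] =>
        if PySem.Str.len p < 4 then none
        else clientes.find? (fun c =>
          p == normPy (nomeOf c) ||
          (decide (4 < PySem.Str.len p) && PySem.Str.isIn p (normPy (nomeOf c))))
      | t0 :: t1 :: ts =>
        bLoop t0 ((t1 :: ts).getLastD t0) clientes none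

-- ===== PRECONDITION & SPEC =====
-- Pre_ excludes clientes containing a dict without the key 'nome_cliente' (on which A raises
-- KeyError once its scan reaches that client, which the ports cannot signal) — except when A
-- returns before ever touching clientes (pessoa_n falsy, or a short single-token name).
def Pre_match_pessoa_exact (pessoa_n : Option String) (clientes : List (List (String × String))) : Prop :=
  pessoa_n = none ∨ pessoa_n = some "" ∨
  (∃ p, pessoa_n = some p ∧ (PySem.Str.split₀ p).length < 2 ∧ PySem.Str.len p < 4) ∨
  ∀ c ∈ clientes, (c.find? (fun kv => kv.1 == "nome_cliente")).isSome
instance (pessoa_n : Option String) (clientes : List (List (String × String))) : Decidable (Pre_match_pessoa_exact pessoa_n clientes) := by unfold Pre_match_pessoa_exact; infer_instance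

def pvWitness_match_pessoa_exact : Option String × (List (List (String × String))) :=
  (some "ana silva", [[("nome_cliente", "Ana Maria Silva")]])

def Spec_match_pessoa_exact (pessoa_n : Option String) (clientes : List (List (String × String))) (out : Option (List (String × String))) : Prop := out = match_pessoa_exact_alt pessoa_n clientes
instance (pessoa_n : Option String) (clientes : List (List (String × String))) (out : Option (List (String × String))) : Decidable (Spec_match_pessoa_exact pessoa_n clientes out) := by unfold Spec_match_pessoa_exact; infer_instance

-- ===== CLAIM (what is proved, stated in full; the proofs are below) =====
def Claim_equal_match_pessoa_exact : Prop := ∀ (pessoa_n : Option String) (clientes : List (List (String × String))), Dom_match_pessoa_exact pessoa_n clientes → Pre_match_pessoa_exact pessoa_n clientes → Spec_match_pessoa_exact pessoa_n clientes (match_pessoa_exact pessoa_n clientes)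

-- ===== LEMMAS AND PROOFS =====

-- tier-1 predicate
def p1 (first last : String) (c : List (String × String)) : Bool :=
  match PySem.Str.split₀ (normPy (nomeOf c)) with
  | [] => false
  | x :: xs => first == x && last == xs.getLastD x

-- tier-2 predicate
def p2 (first last : String) (c : List (String × String)) : Bool :=
  (PySem.Str.split₀ (normPy (nomeOf c))).contains first &&
  (PySem.Str.split₀ (normPy (nomeOf c))).contains last

theorem aLoopSingle_eq_find (p : String) (cs : List (List (String × String))) :
    aLoopSingle p cs = cs.find? (fun c =>
      p == normPy (nomeOf c) ||
      (decide (4 < PySem.Str.len p) && PySem.Str.isIn p (normPy (nomeOf c)))) := by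
  induction cs with
  | nil => rfl
  | cons c rest ih =>
    cases hcond : (p == normPy (nomeOf c) ||
        (decide (4 < PySem.Str.len p) && PySem.Str.isIn p (normPy (nomeOf c)))) <;>
      simp only [aLoopSingle, List.find?, hcond, ih] <;> simp

theorem aLoop1_eq_find (first last : String) (cs : List (List (String × String))) :
    aLoop1 first last cs = cs.find? (p1 first last) := by
  induction cs with
  | nil => rfl
  | cons c rest ih =>
    simp only [aLoop1, List.find?, p1]
    rcases h : PySem.Str.split₀ (normPy (nomeOf c)) with _ | ⟨x, xs⟩
    · simpa using ih
    · cases h1 : (first == x && last == xs.getLastD x) <;> simp only [h1, ih] <;> simp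

theorem aLoop2_eq_find (first last : String) (cs : List (List (String × String))) :
    aLoop2 first last cs = cs.find? (p2 first last) := by
  induction cs with
  | nil => rfl
  | cons c rest ih =>
    simp only [aLoop2, List.find?, p2]
    cases h : ((PySem.Str.split₀ (normPy (nomeOf c))).contains first &&
        (PySem.Str.split₀ (normPy (nomeOf c))).contains last) <;> simp only [ih] <;> simp

theorem bLoop_eq (first last : String) (cs : List (List (String × String)))
    (fb : Option (List (String × String))) :
    bLoop first last cs fb =
      match cs.find? (p1 first last) with
      | some c => some c
      | none => fb.or (cs.find? (p2 first last)) := by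
  induction cs generalizing fb with
  | nil => cases fb <;> rfl
  | cons c rest ih =>
    simp only [bLoop, List.find?, p1, p2]
    rcases h : PySem.Str.split₀ (normPy (nomeOf c)) with _ | ⟨x, xs⟩
    · -- empty token list: both p1 and p2 are false here
      simp only [List.contains, List.elem_nil, Bool.false_and, ih]
    · cases h1 : (first == x && last == xs.getLastD x)
      · simp only [h1, Bool.false_eq_true, if_false]
        cases fb with
        | some f =>
          simp only [Option.isNone_some, Bool.false_and, Bool.false_eq_true, if_false, ih]
          cases hc : ((x :: xs).contains first && (x :: xs).contains last) <;>
            cases List.find? (p1 first last) rest <;> simp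
        | none =>
          cases hc : ((x :: xs).contains first && (x :: xs).contains last)
          · simp only [Option.isNone_none, Bool.true_and, hc, Bool.false_eq_true, if_false, ih]
          · simp only [Option.isNone_none, Bool.true_and, hc, if_true, ih]
            cases List.find? (p1 first last) rest <;> simp
      · simp only [h1, if_true]
    
-- ===== VERDICT (by name: the statement is the Claim_ definition above) =====
theorem match_pessoa_exact_spec : Claim_equal_match_pessoa_exact := by
  intro pessoa_n clientes _ _
  unfold Spec_match_pessoa_exact match_pessoa_exact match_pessoa_exact_alt
  cases pessoa_n with
  | none => rfl
  | some p =>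
    cases hp : (p == "")
    · simp only [hp, Bool.false_eq_true, if_false]
      rcases ht : PySem.Str.split₀ p with _ | ⟨t0, _ | ⟨t1, ts'⟩⟩
      · simp [aLoopSingle_eq_find]
      · simp [aLoopSingle_eq_find]
      · simp only [aLoop1_eq_find, aLoop2_eq_find, bLoop_eq]
        cases clientes.find? (p1 t0 ((t1 :: ts').getLastD t0)) <;> simp
    · simp [hp]
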